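-- pv_equiv track=rewrite | github.com/AlexParlam/Enhancing-Propaganda-Detection-with-Open-Source-Language-Models-A-Comparative-Study | Evaluator.py | map_fuzzy_to_techniques
-- ===== SOURCE A (Python) =====
-- technique_mapping = {
--     "Appeal to Authority": ["Appeal_to_Authority"],
--     "Appeal to fear-prejudice": ["Appeal_to_fear-prejudice"],
--     "Bandwagon": ["Bandwagon,Reductio_ad_hitlerum"],
--     "Black-and-White Fallacy": ["Black-and-White_Fallacy"],
--     "Causal Oversimplification": ["Causal_Oversimplification"],
--     "Doubt": ["Doubt"],
--     "Exaggeration": ["Exaggeration,Minimisation"],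
--     "Minimization": ["Exaggeration,Minimisation"],
--     "Flag-Waving": ["Flag-Waving"],
--     "Loaded Language": ["Loaded_Language"],
--     "Name-Calling": ["Name_Calling,Labeling"],
--     "Labeling": ["Name_Calling,Labeling"],
--     "Repetition": ["Repetition"],
--     "Slogans": ["Slogans"],
--     "Thought-terminating Cliches": ["Thought-terminating_Cliches"],
--     "Whataboutism": ["Whataboutism,Straw_Men,Red_Herring"],
--     "Straw Men": ["Whataboutism,Straw_Men,Red_Herring"],
--     "Red Herring": ["Whataboutism,Straw_Men,Red_Herring"]
-- }
--
-- def map_fuzzy_to_techniques(response):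
--     techniques = []
--     response_lines = response.split('\n')
--     for line in response_lines:
--         for key, value in technique_mapping.items():
--             if key.lower() in line.lower().replace("/", " ").replace("-", " "):  # Case insensitive matching, handle slashes and hyphens
--                 techniques.extend(value)
--     return list(set(techniques))  # Remove duplicates
-- ===== SOURCE B (Python) =====
-- technique_mapping = {
--     "Appeal to Authority": ["Appeal_to_Authority"],
--     "Appeal to fear-prejudice": ["Appeal_to_fear-prejudice"],
--     "Bandwagon": ["Bandwagon,Reductio_ad_hitlerum"],
--     "Black-and-White Fallacy": ["Black-and-White_Fallacy"],
--     "Causal Oversimplification": ["Causal_Oversimplification"],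
--     "Doubt": ["Doubt"],
--     "Exaggeration": ["Exaggeration,Minimisation"],
--     "Minimization": ["Exaggeration,Minimisation"],
--     "Flag-Waving": ["Flag-Waving"],
--     "Loaded Language": ["Loaded_Language"],
--     "Name-Calling": ["Name_Calling,Labeling"],
--     "Labeling": ["Name_Calling,Labeling"],
--     "Repetition": ["Repetition"],
--     "Slogans": ["Slogans"],
--     "Thought-terminating Cliches": ["Thought-terminating_Cliches"],
--     "Whataboutism": ["Whataboutism,Straw_Men,Red_Herring"],
--     "Straw Men": ["Whataboutism,Straw_Men,Red_Herring"],
--     "Red Herring": ["Whataboutism,Straw_Men,Red_Herring"]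
-- }
--
-- # Trigger keys are lowercased once, at module load.
-- _lowered_pairs = [(key.lower(), labels) for key, labels in technique_mapping.items()]
--
-- def map_fuzzy_to_techniques(response):
--     # Normalise the whole response once; since no trigger key contains a newline,
--     # matching against the whole text is the same as matching line by line.
--     text = response.lower().replace("/", " ").replace("-", " ")
--     matched = [labels for low_key, labels in _lowered_pairs if low_key in text]
--     return list(set(label for labels in matched for label in labels))
-- ===== Notes on version B (the rewrite author's own statement) =====
-- stated objective: simpler
-- what changed: A's nested accumulator loops (per line, per key, normalising each line once per key) are replaced by a declarative pipeline: the response is lowercased/normalised once as a whole (valid because no key contains a newline), the trigger keys are lowercased once at module load, and the result is the flatten of a filter over those precomputed pairs; the final list(set(...)) dedup is unchanged.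
import Mathlib
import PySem

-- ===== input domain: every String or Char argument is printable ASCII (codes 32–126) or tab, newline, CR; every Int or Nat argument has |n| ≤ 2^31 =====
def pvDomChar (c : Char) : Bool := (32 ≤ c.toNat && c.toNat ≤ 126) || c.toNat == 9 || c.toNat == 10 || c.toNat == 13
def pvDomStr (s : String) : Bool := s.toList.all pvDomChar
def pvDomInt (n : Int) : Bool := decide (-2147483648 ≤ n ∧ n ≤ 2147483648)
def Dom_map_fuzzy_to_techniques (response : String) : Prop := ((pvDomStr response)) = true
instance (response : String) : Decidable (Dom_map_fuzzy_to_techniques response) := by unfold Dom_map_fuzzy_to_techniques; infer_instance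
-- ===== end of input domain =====

-- B normalises the response once as a whole and replaces A's nested accumulator loops by a declarative pipeline (precomputed lowered keys, filter of matching pairs, flatten), valid because no key contains a newline; list(set(...)) is modelled as the sorted dedup in both ports since CPython's set order is unspecified (outputs compared as a set).


-- ===== PORT A =====
-- the module-level technique_mapping dict
def techniqueMapping : PySem.Dict String (List String) := PySem.Dict.ofList [
  ("Appeal to Authority", ["Appeal_to_Authority"]),
  ("Appeal to fear-prejudice", ["Appeal_to_fear-prejudice"]),
  ("Bandwagon", ["Bandwagon,Reductio_ad_hitlerum"]),
  ("Black-and-White Fallacy", ["Black-and-White_Fallacy"]),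
  ("Causal Oversimplification", ["Causal_Oversimplification"]),
  ("Doubt", ["Doubt"]),
  ("Exaggeration", ["Exaggeration,Minimisation"]),
  ("Minimization", ["Exaggeration,Minimisation"]),
  ("Flag-Waving", ["Flag-Waving"]),
  ("Loaded Language", ["Loaded_Language"]),
  ("Name-Calling", ["Name_Calling,Labeling"]),
  ("Labeling", ["Name_Calling,Labeling"]),
  ("Repetition", ["Repetition"]),
  ("Slogans", ["Slogans"]),
  ("Thought-terminating Cliches", ["Thought-terminating_Cliches"]),
  ("Whataboutism", ["Whataboutism,Straw_Men,Red_Herring"]),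
  ("Straw Men", ["Whataboutism,Straw_Men,Red_Herring"]),
  ("Red Herring", ["Whataboutism,Straw_Men,Red_Herring"])]

-- A, line for line: split into lines, nested loop lines x mapping items, substring
-- test on the per-line lowered '/'- and '-'-normalised text, extend on a hit.
-- list(set(...)): CPython's set iteration order is unspecified (hash-dependent);
-- it is modelled deterministically as the sorted dedup (outputs are compared as a set).
def map_fuzzy_to_techniques (response : String) : List String :=
  let response_lines : List String := (PySem.Str.split? response "\n").getD []
  let techniques : List String :=
    response_lines.foldl (fun acc line =>
      techniqueMapping.items.foldl (fun acc kv =>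
        if PySem.Str.isIn (PySem.Str.lower kv.1)
            (PySem.Str.replace (PySem.Str.replace (PySem.Str.lower line) "/" " ") "-" " ")
        then acc ++ kv.2 else acc) acc) []
  PySem.List.sorted (PySem.Set.ofList techniques) (fun x => x)

-- ===== PORT B =====
-- the module-level _lowered_pairs comprehension
def loweredPairs : List (String × List String) :=
  techniqueMapping.items.map (fun kv => (PySem.Str.lower kv.1, kv.2))

-- B: normalise the whole response once, filter the precomputed lowered pairs, flatten.
-- list(set(...)) modelled exactly as in port A (sorted dedup; compared as a set).
def map_fuzzy_to_techniques_alt (response : String) : List String :=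
  let text : String := PySem.Str.replace (PySem.Str.replace (PySem.Str.lower response) "/" " ") "-" " "
  let matched : List (List String) :=
    (loweredPairs.filter (fun kv => PySem.Str.isIn kv.1 text)).map (fun kv => kv.2)
  PySem.List.sorted (PySem.Set.ofList (matched.flatMap (fun labels => labels))) (fun x => x)

-- ===== PRECONDITION & SPEC =====
def Spec_map_fuzzy_to_techniques (response : String) (out : List String) : Prop := out = map_fuzzy_to_techniques_alt response
instance (response : String) (out : List String) : Decidable (Spec_map_fuzzy_to_techniques response out) := by unfold Spec_map_fuzzy_to_techniques; infer_instance

-- ===== CLAIM (what is proved, stated in full; the proofs are below) =====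
def Claim_equal_map_fuzzy_to_techniques : Prop := ∀ (response : String), Dom_map_fuzzy_to_techniques response → Spec_map_fuzzy_to_techniques response (map_fuzzy_to_techniques response)

-- ===== LEMMAS AND PROOFS =====

theorem pv_replace_go_single (a b : Char) : ∀ (fuel : Nat) (l acc : List Char), l.length ≤ fuel →
    PySem.Chars.replace.go [a] [b] fuel l acc = acc.reverse ++ l.map (fun c => if c = a then b else c)
  | 0, l, acc, h => by
    have : l = [] := List.eq_nil_of_length_eq_zero (Nat.le_zero.mp h)
    subst this; rw [PySem.Chars.replace.go] <;> simp
  | fuel+1, [], acc, h => by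
    rw [PySem.Chars.replace.go] <;> simp
  | fuel+1, c :: t, acc, h => by
    rw [PySem.Chars.replace.go]
    have hlen : t.length ≤ fuel := by simpa using h
    by_cases hc : a = c
    · subst hc
      rw [if_pos (by simp [List.isPrefixOf])]
      have hd : List.drop [a].length (a :: t) = t := by simp
      rw [hd, pv_replace_go_single a b fuel t _ hlen]
      simp
    · rw [if_neg (by simp [List.isPrefixOf]; exact hc)]
      rw [pv_replace_go_single a b fuel t _ hlen]
      simp [Ne.symm hc]

theorem pv_replace_single (s : List Char) (a b : Char) :
    PySem.Chars.replace s [a] [b] = s.map (fun c => if c = a then b else c) := by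
  unfold PySem.Chars.replace
  rw [if_neg (by simp)]
  rw [pv_replace_go_single a b s.length s [] (le_refl _)]
  simp

def pvNormChar (c : Char) : Char :=
  if (if PySem.Chars.lowerChar c = '/' then ' ' else PySem.Chars.lowerChar c) = '-' then ' '
  else (if PySem.Chars.lowerChar c = '/' then ' ' else PySem.Chars.lowerChar c)

theorem pv_norm_toList (s : String) :
    (PySem.Str.replace (PySem.Str.replace (PySem.Str.lower s) "/" " ") "-" " ").toList
      = s.toList.map pvNormChar := by
  rw [PySem.Str.toList_replace, PySem.Str.toList_replace, PySem.Str.toList_lower]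
  show PySem.Chars.replace (PySem.Chars.replace (PySem.Chars.lower s.toList) ['/'] [' ']) ['-'] [' '] = _
  rw [PySem.Chars.lower, pv_replace_single, pv_replace_single, List.map_map, List.map_map]
  rfl

theorem pv_lowerChar_nl_iff (c : Char) : PySem.Chars.lowerChar c = '\n' ↔ c = '\n' := by
  constructor
  · intro h
    unfold PySem.Chars.lowerChar at h
    split_ifs at h with hu
    · exfalso
      simp only [PySem.Chars.isupper, Bool.and_eq_true, decide_eq_true_eq, Char.le_def,
        UInt32.le_iff_toNat_le] at hu
      have hle : c.toNat ≤ 90 := hu.2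
      have hge : 65 ≤ c.toNat := hu.1
      have h10 : (Char.ofNat (c.toNat + 32)).toNat = 10 := by rw [h]; rfl
      have hv : (Char.ofNat (c.toNat + 32)).toNat = c.toNat + 32 := by
        unfold Char.ofNat
        split
        · rfl
        · next hnv => exact absurd (Or.inl (by omega)) hnv
      omega
    · exact h
  · intro h; subst h; decide

theorem pv_normChar_nl_iff (c : Char) : pvNormChar c = '\n' ↔ c = '\n' := by
  constructor
  · intro h
    unfold pvNormChar at h
    split_ifs at h with h2 h1 h1 <;>
      first
        | exact absurd h (by decide)
        | exact (pv_lowerChar_nl_iff c).mp h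
  · intro h; subst h; decide

-- reference line splitter (split on '\n')
def pvSplitNl : List Char → List (List Char)
  | [] => [[]]
  | c :: t => if c = '\n' then [] :: pvSplitNl t else (pvSplitNl t).modifyHead (fun h => c :: h)

theorem pv_splitNl_ne_nil : ∀ (t : List Char), pvSplitNl t ≠ []
  | [] => by simp [pvSplitNl]
  | c :: t => by
    unfold pvSplitNl
    split_ifs
    · simp
    · cases h : pvSplitNl t with
      | nil => exact absurd h (pv_splitNl_ne_nil t)
      | cons a l => simp [List.modifyHead]

theorem pv_modifyHead_modifyHead {α : Type} (f g : α → α) (l : List α) :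
    (l.modifyHead g).modifyHead f = l.modifyHead (fun x => f (g x)) := by
  cases l <;> simp [List.modifyHead]

theorem pv_splitOn_go_nl : ∀ (fuel : Nat) (l cur : List Char) (acc : List (List Char)), l.length ≤ fuel →
    PySem.Chars.splitOn.go ['\n'] fuel l cur acc
      = acc.reverse ++ (pvSplitNl l).modifyHead (fun h => cur.reverse ++ h)
  | 0, l, cur, acc, h => by
    have : l = [] := List.eq_nil_of_length_eq_zero (Nat.le_zero.mp h)
    subst this; rw [PySem.Chars.splitOn.go] <;> simp [pvSplitNl, List.modifyHead]
  | fuel+1, [], cur, acc, h => by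
    rw [PySem.Chars.splitOn.go] <;> simp [pvSplitNl, List.modifyHead]
  | fuel+1, c :: t, cur, acc, h => by
    rw [PySem.Chars.splitOn.go]
    have hlen : t.length ≤ fuel := by simpa using h
    by_cases hc : c = '\n'
    · subst hc
      rw [if_pos (by simp [List.isPrefixOf])]
      have hd : List.drop (['\n'].length) ('\n' :: t) = t := by simp
      rw [hd, pv_splitOn_go_nl fuel t [] (cur.reverse :: acc) hlen]
      have : pvSplitNl ('\n' :: t) = [] :: pvSplitNl t := by simp [pvSplitNl]
      rw [this]
      cases hs : pvSplitNl t <;> simp [List.modifyHead]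
    · rw [if_neg (by simp [List.isPrefixOf]; exact fun hh => absurd hh.symm hc)]
      rw [pv_splitOn_go_nl fuel t (c :: cur) acc hlen]
      have : pvSplitNl (c :: t) = (pvSplitNl t).modifyHead (fun h => c :: h) := by simp [pvSplitNl, hc]
      rw [this, pv_modifyHead_modifyHead]
      simp

theorem pv_splitOn_nl (s : List Char) : PySem.Chars.splitOn s ['\n'] = pvSplitNl s := by
  unfold PySem.Chars.splitOn
  rw [pv_splitOn_go_nl (s.length + 1) s [] [] (by omega)]
  cases h : pvSplitNl s <;> simp [List.modifyHead]

theorem pv_splitNl_head : ∀ (t : List Char), ∃ rest,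
    pvSplitNl t = (t.takeWhile (fun c => !(c == '\n'))) :: rest
  | [] => ⟨[], by simp [pvSplitNl]⟩
  | c :: t => by
    by_cases hc : c = '\n'
    · subst hc
      exact ⟨pvSplitNl t, by simp [pvSplitNl, List.takeWhile]⟩
    · obtain ⟨rest, hr⟩ := pv_splitNl_head t
      refine ⟨rest, ?_⟩
      simp only [pvSplitNl, hc, if_neg, hr, List.modifyHead]
      simp [List.takeWhile_cons, hc]

theorem pv_prefix_takeWhile {q : Char → Bool} : ∀ {p t : List Char}, p <+: t → (∀ c ∈ p, q c = true) →
    p <+: t.takeWhile q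
  | [], t, _, _ => List.nil_prefix
  | d :: p', t, hpre, hq => by
    obtain ⟨r, hr⟩ := hpre
    subst hr
    rw [List.cons_append, List.takeWhile_cons, hq d (by simp)]
    simp only [if_pos]
    exact List.cons_prefix_cons.mpr ⟨rfl,
      pv_prefix_takeWhile (List.prefix_append p' r) (fun c hc => hq c (by simp [hc]))⟩

-- a newline-free pattern is an infix of a text iff it is an infix of one of its lines
theorem pv_infix_split {p : List Char} (hnl : '\n' ∉ p) : ∀ (s : List Char),
    (p <:+: s ↔ ∃ l ∈ pvSplitNl s, p <:+: l)
  | [] => by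
    simp [pvSplitNl]
  | c :: t => by
    by_cases hc : c = '\n'
    · subst hc
      have hsp : pvSplitNl ('\n' :: t) = [] :: pvSplitNl t := by simp [pvSplitNl]
      rw [hsp, List.infix_cons_iff]
      constructor
      · rintro (hpre | hinf)
        · have hp : p = [] := by
            cases p with
            | nil => rfl
            | cons d p' =>
              obtain ⟨r, hr⟩ := hpre
              exfalso; apply hnl
              have : d = '\n' := by simpa using congrArg (fun l => l.head?) hr
              simp [this]
          subst hp
          exact ⟨[], by simp⟩
        · obtain ⟨l, hl, hpl⟩ := (pv_infix_split hnl t).mp hinf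
          exact ⟨l, by simp [hl], hpl⟩
      · rintro ⟨l, hl, hpl⟩
        simp only [List.mem_cons] at hl
        rcases hl with rfl | hl
        · have : p = [] := List.eq_nil_of_infix_nil hpl
          subst this
          exact Or.inr (List.nil_infix)
        · exact Or.inr ((pv_infix_split hnl t).mpr ⟨l, hl, hpl⟩)
    · obtain ⟨rest, hr⟩ := pv_splitNl_head t
      have hsp : pvSplitNl (c :: t) = (c :: t.takeWhile (fun c => !(c == '\n'))) :: rest := by
        simp [pvSplitNl, hc, hr, List.modifyHead]
      have hIH := pv_infix_split hnl t
      have hIH' : p <:+: t ↔ p <:+: List.takeWhile (fun c => !(c == '\n')) t ∨ ∃ l ∈ rest, p <:+: l := by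
        rw [hIH, hr]; simp
      rw [hsp, List.infix_cons_iff]
      simp only [List.mem_cons]
      constructor
      · rintro (hpre | hinf)
        · cases p with
          | nil => exact ⟨_, Or.inl rfl, List.nil_infix⟩
          | cons d p' =>
            obtain ⟨hd, hp'⟩ := List.cons_prefix_cons.mp hpre
            subst hd
            have hp'tw : p' <+: List.takeWhile (fun c => !(c == '\n')) t :=
              pv_prefix_takeWhile hp' (fun x hx => by
                simp only [bne_iff_ne, ne_eq, Bool.not_eq_eq_eq_not, Bool.not_true, beq_eq_false_iff_ne]
                exact fun he => hnl (by simp [he ▸ hx]))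
            exact ⟨_, Or.inl rfl, (List.cons_prefix_cons.mpr ⟨rfl, hp'tw⟩).isInfix⟩
        · rcases hIH'.mp hinf with htw | ⟨l, hl, hpl⟩
          · exact ⟨_, Or.inl rfl, List.infix_cons htw⟩
          · exact ⟨l, Or.inr hl, hpl⟩
      · rintro ⟨l, hl | hl, hpl⟩
        · subst hl
          rcases List.infix_cons_iff.mp hpl with hpre | hinf
          · cases p with
            | nil => exact Or.inr (List.nil_infix)
            | cons d p' =>
              obtain ⟨hd, hp'⟩ := List.cons_prefix_cons.mp hpre
              subst hd
              exact Or.inl (List.cons_prefix_cons.mpr ⟨rfl, hp'.trans (List.takeWhile_prefix _)⟩)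
          · exact Or.inr (hIH'.mpr (Or.inl hinf))
        · exact Or.inr (hIH'.mpr (Or.inr ⟨l, hl, hpl⟩))

-- a character map that fixes exactly '\n' commutes with the line splitter
theorem pv_map_splitNl {f : Char → Char} (h1 : f '\n' = '\n') (h2 : ∀ c, f c = '\n' → c = '\n') :
    ∀ (s : List Char), pvSplitNl (s.map f) = (pvSplitNl s).map (List.map f)
  | [] => by simp [pvSplitNl]
  | c :: t => by
    by_cases hc : c = '\n'
    · subst hc
      simp only [List.map_cons, h1]
      simp [pvSplitNl, pv_map_splitNl h1 h2 t]
    · have hfc : ¬ f c = '\n' := fun he => hc (h2 c he)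
      simp only [List.map_cons, pvSplitNl, hfc, if_neg, hc]
      rw [pv_map_splitNl h1 h2 t]
      obtain ⟨rest, hr⟩ := pv_splitNl_head t
      rw [hr]
      simp [List.modifyHead]

theorem pv_mem_foldl_filter {α β : Type} (x : β) (p : α → Bool) (g : α → List β) :
    ∀ (l : List α) (acc : List β),
      (x ∈ l.foldl (fun acc kv => if p kv then acc ++ g kv else acc) acc
        ↔ x ∈ acc ∨ ∃ kv ∈ l, p kv = true ∧ x ∈ g kv)
  | [], acc => by simp
  | kv :: l, acc => by
    rw [List.foldl_cons, pv_mem_foldl_filter x p g l]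
    by_cases hp : p kv = true <;> simp [hp] <;> tauto

theorem pv_mem_foldl_gen {α β : Type} (x : β) (g : List β → α → List β) (Q : α → Prop)
    (h : ∀ acc y, x ∈ g acc y ↔ x ∈ acc ∨ Q y) :
    ∀ (l : List α) (acc : List β), (x ∈ l.foldl g acc ↔ x ∈ acc ∨ ∃ y ∈ l, Q y)
  | [], acc => by simp
  | y :: l, acc => by
    rw [List.foldl_cons, pv_mem_foldl_gen x g Q h l]
    rw [h acc y]
    constructor
    · rintro ((hx | hq) | ⟨z, hz, hqz⟩)
      · exact Or.inl hx
      · exact Or.inr ⟨y, by simp, hq⟩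
      · exact Or.inr ⟨z, by simp [hz], hqz⟩
    · rintro (hx | ⟨z, hz, hqz⟩)
      · exact Or.inl (Or.inl hx)
      · rcases List.mem_cons.mp hz with rfl | hz
        · exact Or.inl (Or.inr hqz)
        · exact Or.inr ⟨z, hz, hqz⟩

-- every key of the mapping, lowered, is newline-free
theorem pv_keys_nl : ∀ kv ∈ techniqueMapping.items, '\n' ∉ (PySem.Str.lower kv.1).toList := by
  decide

theorem pv_lines (response : String) : ∃ L, PySem.Str.split? response "\n" = some L ∧
    L.map String.toList = pvSplitNl response.toList := by
  have h := PySem.Str.split?_map response "\n"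
  cases hsp : PySem.Str.split? response "\n" with
  | none =>
    rw [hsp] at h
    exact absurd h.symm (by simp [PySem.Chars.split?])
  | some L =>
    refine ⟨L, rfl, ?_⟩
    rw [hsp] at h
    simpa [PySem.Chars.split?, pv_splitOn_nl] using h

theorem pv_key_line (response : String) (k : String) (hk : '\n' ∉ (PySem.Str.lower k).toList)
    (L : List String) (hL : L.map String.toList = pvSplitNl response.toList) :
    (PySem.Str.isIn (PySem.Str.lower k)
       (PySem.Str.replace (PySem.Str.replace (PySem.Str.lower response) "/" " ") "-" " ") = true)
    ↔ ∃ line ∈ L, PySem.Str.isIn (PySem.Str.lower k)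
       (PySem.Str.replace (PySem.Str.replace (PySem.Str.lower line) "/" " ") "-" " ") = true := by
  have h1 : pvNormChar '\n' = '\n' := by decide
  have h2 : ∀ c, pvNormChar c = '\n' → c = '\n' := fun c => (pv_normChar_nl_iff c).mp
  simp only [PySem.Str.isIn_iff_infix, pv_norm_toList]
  rw [pv_infix_split hk, pv_map_splitNl h1 h2, ← hL, List.map_map]
  simp [Function.comp]

theorem pv_sorted_set_eq (a b : List String) (h : ∀ x, x ∈ a ↔ x ∈ b) :
    PySem.List.sorted (PySem.Set.ofList a) (fun x => x)
      = PySem.List.sorted (PySem.Set.ofList b) (fun x => x) := by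
  have hperm : (PySem.List.sorted (PySem.Set.ofList b) (fun x => x) false).Perm (PySem.Set.ofList a) :=
    (PySem.List.sorted_perm _ _ _).trans
      ((List.perm_ext_iff_of_nodup (PySem.Set.nodup_ofList b) (PySem.Set.nodup_ofList a)).mpr
        (fun y => by rw [PySem.Set.mem_ofList, PySem.Set.mem_ofList, h y]))
  exact PySem.List.sorted_eq_of_perm_of_pairwise_lt _ _ _ hperm (PySem.List.sorted_ofList_pairwise_lt b)

-- A's nested fold, as a membership statement over the single items pass
theorem pv_main (items : List (String × List String))
    (hkeys : ∀ kv ∈ items, '\n' ∉ (PySem.Str.lower kv.1).toList)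
    (response : String) (L : List String)
    (hL : L.map String.toList = pvSplitNl response.toList) (x : String) :
    x ∈ L.foldl (fun acc line => items.foldl (fun acc kv =>
        if PySem.Str.isIn (PySem.Str.lower kv.1)
            (PySem.Str.replace (PySem.Str.replace (PySem.Str.lower line) "/" " ") "-" " ")
        then acc ++ kv.2 else acc) acc) []
      ↔ ∃ kv ∈ items,
          PySem.Str.isIn (PySem.Str.lower kv.1)
              (PySem.Str.replace (PySem.Str.replace (PySem.Str.lower response) "/" " ") "-" " ") = true
            ∧ x ∈ kv.2 := by
  rw [pv_mem_foldl_gen x _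
        (fun line => ∃ kv ∈ items,
          PySem.Str.isIn (PySem.Str.lower kv.1)
              (PySem.Str.replace (PySem.Str.replace (PySem.Str.lower line) "/" " ") "-" " ") = true
            ∧ x ∈ kv.2)
        (fun acc line => pv_mem_foldl_filter x _ _ items acc) L []]
  simp only [List.not_mem_nil, false_or]
  constructor
  · rintro ⟨line, hline, kv, hkv, hp, hx⟩
    exact ⟨kv, hkv, (pv_key_line response kv.1 (hkeys kv hkv) L hL).mpr ⟨line, hline, hp⟩, hx⟩
  · rintro ⟨kv, hkv, hp, hx⟩
    obtain ⟨line, hline, hp2⟩ := (pv_key_line response kv.1 (hkeys kv hkv) L hL).mp hp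
    exact ⟨line, hline, kv, hkv, hp2, hx⟩

-- B's pipeline, as the same membership statement
theorem pv_alt_mem (response : String) (x : String) :
    x ∈ (((loweredPairs.filter (fun kv => PySem.Str.isIn kv.1
            (PySem.Str.replace (PySem.Str.replace (PySem.Str.lower response) "/" " ") "-" " "))).map
          (fun kv => kv.2)).flatMap (fun labels => labels))
      ↔ ∃ kv ∈ techniqueMapping.items,
          PySem.Str.isIn (PySem.Str.lower kv.1)
              (PySem.Str.replace (PySem.Str.replace (PySem.Str.lower response) "/" " ") "-" " ") = true
            ∧ x ∈ kv.2 := by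
  simp only [List.mem_flatMap, List.mem_map, List.mem_filter, loweredPairs]
  constructor
  · rintro ⟨labels, ⟨kv, ⟨⟨kv0, hkv0, rfl⟩, hp⟩, rfl⟩, hx⟩
    exact ⟨kv0, hkv0, hp, hx⟩
  · rintro ⟨kv, hkv, hp, hx⟩
    exact ⟨kv.2, ⟨(PySem.Str.lower kv.1, kv.2), ⟨⟨kv, hkv, rfl⟩, hp⟩, rfl⟩, hx⟩

-- ===== VERDICT (by name: the statement is the Claim_ definition above) =====
theorem map_fuzzy_to_techniques_spec : Claim_equal_map_fuzzy_to_techniques := by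
  intro response _hdom
  unfold Spec_map_fuzzy_to_techniques map_fuzzy_to_techniques map_fuzzy_to_techniques_alt
  obtain ⟨L, hsp, hL⟩ := pv_lines response
  simp only [hsp, Option.getD_some]
  apply pv_sorted_set_eq
  intro x
  rw [pv_main techniqueMapping.items pv_keys_nl response L hL x, pv_alt_mem response x]
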